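-- pv_equiv track=rewrite | github.com/Tate-Has/lumbergh | backend/lumbergh/focus_export.py | archive_to_markdown
-- ===== SOURCE A (Python) =====
-- from collections import defaultdict
--
-- def archive_to_markdown(data: dict) -> str:
--     """Convert Focus archive JSON to markdown format."""
--     groups: dict[str, list] = defaultdict(list)
--     for t in data.get("tasks", []):
--         groups[t.get("archived_date", "unknown")].append(t)
--
--     md = ""
--     dates = sorted(groups.keys(), reverse=True)
--     for date in dates:
--         md += f"## {date}\n"
--         for t in groups[date]:
--             proj = f"[{t['project']}] " if t.get("project") else ""
--             md += f"- [x] **{proj}{t['title']}**"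
--             if t.get("priority"):
--                 md += f" !{t['priority']}"
--             md += "\n"
--             if t.get("blocker"):
--                 md += f"  - blocker: {t['blocker']}\n"
--             if t.get("check_in_note"):
--                 md += f"  - check_in: {t['check_in_note']}\n"
--         md += "\n"
--
--     for n in data.get("notes", []):
--         md += f"## Notes -- {n.get('date', 'unknown')}\n"
--         md += n.get("content", "") + "\n\n"
--
--     return md
-- ===== SOURCE B (Python) =====
-- def archive_to_markdown(data: dict) -> str:
--     """Convert Focus archive JSON to markdown format."""
--     out = []
--     tasks = sorted(data.get("tasks", []),
--                    key=lambda t: t.get("archived_date", "unknown"),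
--                    reverse=True)
--     prev = None
--     for t in tasks:
--         date = t.get("archived_date", "unknown")
--         if date != prev:
--             if prev is not None:
--                 out.append("\n")
--             out.append(f"## {date}\n")
--             prev = date
--         proj = f"[{t['project']}] " if t.get("project") else ""
--         line = f"- [x] **{proj}{t['title']}**"
--         if t.get("priority"):
--             line += f" !{t['priority']}"
--         out.append(line + "\n")
--         if t.get("blocker"):
--             out.append(f"  - blocker: {t['blocker']}\n")
--         if t.get("check_in_note"):
--             out.append(f"  - check_in: {t['check_in_note']}\n")
--     if prev is not None:
--         out.append("\n")
--     for n in data.get("notes", []):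
--         out.append(f"## Notes -- {n.get('date', 'unknown')}\n")
--         out.append(n.get("content", "") + "\n\n")
--     return "".join(out)
-- ===== Notes on version B (the rewrite author's own statement) =====
-- stated objective: alternative
-- what changed: A groups tasks into a defaultdict and then iterates over its reverse-sorted keys with string += concatenation; B instead stable-sorts the task list once by its default-filled date in reverse and emits headers in a single scan whenever the date changes, collecting pieces in a list joined once at the end (the notes loop appends to the same list).
import Mathlib
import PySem

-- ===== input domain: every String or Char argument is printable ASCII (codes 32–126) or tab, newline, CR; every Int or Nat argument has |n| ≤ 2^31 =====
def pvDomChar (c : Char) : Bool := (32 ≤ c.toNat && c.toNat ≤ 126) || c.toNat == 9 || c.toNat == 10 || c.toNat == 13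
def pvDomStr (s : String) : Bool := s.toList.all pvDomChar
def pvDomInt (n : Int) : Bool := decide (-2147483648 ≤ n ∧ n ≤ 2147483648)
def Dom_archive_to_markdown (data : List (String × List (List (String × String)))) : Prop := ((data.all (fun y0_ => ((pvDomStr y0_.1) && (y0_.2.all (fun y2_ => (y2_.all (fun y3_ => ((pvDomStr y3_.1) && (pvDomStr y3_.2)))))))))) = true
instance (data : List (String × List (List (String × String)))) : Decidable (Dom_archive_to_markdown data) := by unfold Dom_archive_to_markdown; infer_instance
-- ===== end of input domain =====

-- B replaces A's defaultdict-grouping + sorted(keys) double pass by one stable reverse sort of the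
-- task list followed by a single scan that emits a header whenever the date changes, collecting
-- output pieces in a list joined once at the end (objective: alternative decomposition).

-- ===== PORT A =====
-- t.get(key, dflt) on a string-valued dict
def pvGetDS (t : List (String × String)) (key dflt : String) : String :=
  PySem.Dict.getD (⟨t⟩ : PySem.Dict String String) key dflt

-- Python truthiness of t.get(key): key present with a non-empty string value
def pvTruthy (t : List (String × String)) (key : String) : Bool :=
  match PySem.Dict.get? (⟨t⟩ : PySem.Dict String String) key with
  | some s => !(s == "")
  | none => false

-- t.get("archived_date", "unknown")
def pvDateKey (t : List (String × String)) : String := pvGetDS t "archived_date" "unknown"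

-- the body of A's inner `for t in groups[date]:` loop (md is the string accumulator)
def pvRenderTaskA (md : String) (t : List (String × String)) : String :=
  let proj := if pvTruthy t "project" then "[" ++ pvGetDS t "project" "" ++ "] " else ""
  let md := md ++ "- [x] **" ++ proj ++ pvGetDS t "title" "" ++ "**"
  let md := if pvTruthy t "priority" then md ++ " !" ++ pvGetDS t "priority" "" else md
  let md := md ++ "\n"
  let md := if pvTruthy t "blocker" then md ++ "  - blocker: " ++ pvGetDS t "blocker" "" ++ "\n" else md
  if pvTruthy t "check_in_note" then md ++ "  - check_in: " ++ pvGetDS t "check_in_note" "" ++ "\n" else md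

def archive_to_markdown (data : List (String × List (List (String × String)))) : String :=
  let d : PySem.Dict String (List (List (String × String))) := ⟨data⟩
  let tasks := d.getD "tasks" []
  let groups := tasks.foldl (fun g t => PySem.Dict.modify g (pvDateKey t) [] (fun l => l ++ [t]))
      PySem.Dict.empty
  let dates := PySem.List.sorted groups.keys (fun x => x) true
  let md := dates.foldl (fun md date =>
      let md := md ++ "## " ++ date ++ "\n"
      let md := (groups.getD date []).foldl pvRenderTaskA md
      md ++ "\n") ""
  (d.getD "notes" []).foldl (fun md n =>
      md ++ "## Notes -- " ++ pvGetDS n "date" "unknown" ++ "\n"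
         ++ (pvGetDS n "content" "" ++ "\n\n")) md

-- ===== PORT B =====
-- the pieces B appends to `out` for one task
def pvTaskLinesB (t : List (String × String)) : List String :=
  let proj := if pvTruthy t "project" then "[" ++ pvGetDS t "project" "" ++ "] " else ""
  let line := "- [x] **" ++ proj ++ pvGetDS t "title" "" ++ "**"
  let line := if pvTruthy t "priority" then line ++ " !" ++ pvGetDS t "priority" "" else line
  [line ++ "\n"]
    ++ (if pvTruthy t "blocker" then ["  - blocker: " ++ pvGetDS t "blocker" "" ++ "\n"] else [])
    ++ (if pvTruthy t "check_in_note" then ["  - check_in: " ++ pvGetDS t "check_in_note" "" ++ "\n"] else [])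

-- one iteration of B's scan over the sorted tasks; state = (out, prev)
def pvStepB (acc : List String × Option String) (t : List (String × String)) :
    List String × Option String :=
  let date := pvDateKey t
  let out := if acc.2 ≠ some date
    then acc.1 ++ (if acc.2.isSome then ["\n"] else []) ++ ["## " ++ date ++ "\n"]
    else acc.1
  (out ++ pvTaskLinesB t, some date)

def archive_to_markdown_alt (data : List (String × List (List (String × String)))) : String :=
  let d : PySem.Dict String (List (List (String × String))) := ⟨data⟩
  let sortedTasks := PySem.List.sorted (d.getD "tasks" []) pvDateKey true
  let r := sortedTasks.foldl pvStepB ([], none)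
  let out := r.1 ++ (if r.2.isSome then ["\n"] else [])
  let out := (d.getD "notes" []).foldl (fun out n =>
      out ++ ["## Notes -- " ++ pvGetDS n "date" "unknown" ++ "\n",
              pvGetDS n "content" "" ++ "\n\n"]) out
  PySem.Str.join "" out

-- ===== PRECONDITION & SPEC =====
-- Pre_ excludes exactly the inputs on which A raises KeyError: a task without a "title" key.
def Pre_archive_to_markdown (data : List (String × List (List (String × String)))) : Prop :=
  ∀ t ∈ PySem.Dict.getD (⟨data⟩ : PySem.Dict String (List (List (String × String)))) "tasks" [],
    "title" ∈ t.map (fun p => p.1)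
instance (data : List (String × List (List (String × String)))) : Decidable (Pre_archive_to_markdown data) := by unfold Pre_archive_to_markdown; infer_instance

def pvWitness_archive_to_markdown : (List (String × List (List (String × String)))) :=
  [("tasks", [[("title", "write spec"), ("archived_date", "2024-01-02")],
              [("title", "ship it"), ("project", "pv"), ("priority", "1")]]),
   ("notes", [[("date", "2024-01-03"), ("content", "all done")]])]

def Spec_archive_to_markdown (data : List (String × List (List (String × String)))) (out : String) : Prop := out = archive_to_markdown_alt data
instance (data : List (String × List (List (String × String)))) (out : String) : Decidable (Spec_archive_to_markdown data out) := by unfold Spec_archive_to_markdown; infer_instance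

-- ===== CLAIM (what is proved, stated in full; the proofs are below) =====
def Claim_equal_archive_to_markdown : Prop := ∀ (data : List (String × List (List (String × String)))), Dom_archive_to_markdown data → Pre_archive_to_markdown data → Spec_archive_to_markdown data (archive_to_markdown data)

-- ===== LEMMAS AND PROOFS =====

def pvChars (l : List String) : List Char := (l.map String.toList).flatten

def pvG (tasks : List (List (String × String))) (e : String) : List (List (String × String)) :=
  tasks.filter (fun t => pvDateKey t == e)

def pvD (tasks : List (List (String × String))) : List String :=
  PySem.List.sorted (PySem.List.dedup (tasks.map pvDateKey)) (fun d => d) true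

def pvInsDesc (d : String) : List String → List String
  | [] => [d]
  | e :: es => if e < d then d :: e :: es else if d = e then e :: es else e :: pvInsDesc d es

theorem mem_pvInsDesc (d x : String) (D : List String) :
    x ∈ pvInsDesc d D ↔ x = d ∨ x ∈ D := by
  induction D with
  | nil => simp [pvInsDesc]
  | cons e es ih =>
    simp only [pvInsDesc]
    split_ifs with h1 h2
    · simp only [List.mem_cons]
    · subst h2
      simp only [List.mem_cons]
      tauto
    · simp only [List.mem_cons, ih]
      tauto

theorem pairwise_pvInsDesc (d : String) (D : List String)
    (h : D.Pairwise (fun a b => b < a)) :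
    (pvInsDesc d D).Pairwise (fun a b => b < a) := by
  induction D with
  | nil => simp [pvInsDesc]
  | cons e es ih =>
    rcases List.pairwise_cons.mp h with ⟨he, hes⟩
    simp only [pvInsDesc]
    split_ifs with h1 h2
    · refine List.pairwise_cons.mpr ⟨?_, h⟩
      intro y hy
      rcases List.mem_cons.mp hy with rfl | hy
      · exact h1
      · exact lt_trans (he _ hy) h1
    · exact h
    · refine List.pairwise_cons.mpr ⟨?_, ih hes⟩
      intro y hy
      rcases (mem_pvInsDesc d y es).mp hy with rfl | hy
      · exact lt_of_le_of_ne (not_lt.mp h1) h2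
      · exact he _ hy

theorem pvInsDesc_of_mem (d : String) (D : List String)
    (h : D.Pairwise (fun a b => b < a)) (hd : d ∈ D) : pvInsDesc d D = D := by
  induction D with
  | nil => cases hd
  | cons e es ih =>
    rcases List.pairwise_cons.mp h with ⟨he, hes⟩
    simp only [pvInsDesc]
    rcases List.mem_cons.mp hd with rfl | hd
    · simp
    · have hlt : d < e := he _ hd
      rw [if_neg (not_lt.mpr (le_of_lt hlt)), if_neg (by rintro rfl; exact lt_irrefl d hlt),
        ih hes hd]

theorem perm_pvInsDesc_of_not_mem (d : String) (D : List String) (h : d ∉ D) :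
    (pvInsDesc d D).Perm (d :: D) := by
  induction D with
  | nil => simp [pvInsDesc]
  | cons e es ih =>
    simp only [pvInsDesc]
    split_ifs with h1 h2
    · exact List.Perm.refl _
    · exact absurd (h2 ▸ List.mem_cons_self) h
    · exact ((ih (fun hm => h (List.mem_cons_of_mem _ hm))).cons e).trans (List.Perm.swap d e es)

theorem pv_insertBy_cons {α : Type} (before : α → α → Bool) (x y : α) (ys : List α) :
    PySem.List.insertBy before x (y :: ys) =
      if before x y then x :: y :: ys else y :: PySem.List.insertBy before x ys := by
  simp [PySem.List.insertBy]

theorem pv_insertBy_all {α : Type} (before : α → α → Bool) (x : α) (ys : List α)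
    (h : ∀ y ∈ ys, before x y = true) :
    PySem.List.insertBy before x ys = x :: ys := by
  cases ys with
  | nil => simp [PySem.List.insertBy]
  | cons y ys => rw [pv_insertBy_cons, if_pos (h y List.mem_cons_self)]

theorem pv_insertBy_append {α : Type} (before : α → α → Bool) (x : α) (l r : List α)
    (h : ∀ y ∈ l, before x y = false) :
    PySem.List.insertBy before x (l ++ r) = l ++ PySem.List.insertBy before x r := by
  induction l with
  | nil => simp
  | cons y ys ih =>
    rw [List.cons_append, pv_insertBy_cons, if_neg (by simp [h y List.mem_cons_self]),
      ih (fun z hz => h z (List.mem_cons_of_mem _ hz))]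
    rfl

theorem pvG_ne_nil (tasks : List (List (String × String))) (e : String)
    (h : e ∈ tasks.map pvDateKey) : pvG tasks e ≠ [] := by
  rcases List.mem_map.mp h with ⟨t, ht, rfl⟩
  have : t ∈ pvG tasks (pvDateKey t) := List.mem_filter.mpr ⟨ht, by simp⟩
  intro hnil
  rw [hnil] at this
  cases this

theorem pvDateKey_of_mem_pvG (tasks : List (List (String × String))) (e : String)
    (t : List (String × String)) (h : t ∈ pvG tasks e) : pvDateKey t = e := by
  have := (List.mem_filter.mp h).2
  simpa using this

theorem pv_key_mem_of_mem_pvG (tasks : List (List (String × String))) (e : String)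
    (t : List (String × String)) (h : t ∈ pvG tasks e) : e ∈ tasks.map pvDateKey :=
  pvDateKey_of_mem_pvG tasks e t h ▸ List.mem_map_of_mem (List.mem_filter.mp h).1

theorem pvG_append_singleton (tasks : List (List (String × String))) (x : List (String × String))
    (e : String) :
    pvG (tasks ++ [x]) e = pvG tasks e ++ (if pvDateKey x = e then [x] else []) := by
  simp only [pvG, List.filter_append]
  congr 1
  split_ifs with h <;> simp [h]

theorem pvG_nil_of_not_mem (tasks : List (List (String × String))) (e : String)
    (h : e ∉ tasks.map pvDateKey) : pvG tasks e = [] := by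
  rcases hG : pvG tasks e with _ | ⟨u, us⟩
  · rfl
  · exact absurd (pv_key_mem_of_mem_pvG tasks e u (hG ▸ List.mem_cons_self)) h

theorem pv_flatMap_congr {α : Type} (l : List String) (f g : String → List α)
    (h : ∀ e ∈ l, f e = g e) : l.flatMap f = l.flatMap g := by
  simp only [List.flatMap_def]
  exact congrArg List.flatten (List.map_congr_left h)

theorem pv_key_mem_of_mem_flatMap (xs : List (List (String × String))) (es : List String)
    (y : List (String × String)) (h : y ∈ es.flatMap (pvG xs)) : pvDateKey y ∈ es := by
  rcases List.mem_flatMap.mp h with ⟨e, he, hy⟩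
  exact pvDateKey_of_mem_pvG xs e y hy ▸ he

-- the key stability step: inserting one task into the grouped view of the already-sorted prefix
theorem pv_insertBy_flatMap (xs : List (List (String × String))) (x : List (String × String))
    (D : List String)
    (hpw : D.Pairwise (fun a b => b < a))
    (h1 : ∀ e ∈ D, e ∈ xs.map pvDateKey)
    (h2 : pvDateKey x ∈ xs.map pvDateKey → pvDateKey x ∈ D) :
    PySem.List.insertBy (fun a b => decide (pvDateKey b < pvDateKey a)) x
        (D.flatMap (pvG xs))
      = (pvInsDesc (pvDateKey x) D).flatMap (pvG (xs ++ [x])) := by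
  induction D with
  | nil =>
    have hx : pvG xs (pvDateKey x) = [] :=
      pvG_nil_of_not_mem xs _ (fun hm => by cases h2 hm)
    simp [pvInsDesc, PySem.List.insertBy, pvG_append_singleton, hx]
  | cons e es ih =>
    rcases List.pairwise_cons.mp hpw with ⟨he, hes⟩
    rcases (List.exists_cons_of_ne_nil (pvG_ne_nil xs e (h1 e List.mem_cons_self))) with ⟨t, ts, hG⟩
    have hkt : pvDateKey t = e := pvDateKey_of_mem_pvG xs e t (hG ▸ List.mem_cons_self)
    simp only [List.flatMap_cons, pvInsDesc]
    rcases lt_trichotomy e (pvDateKey x) with hlt | heq | hgt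
    · -- a strictly larger date: x opens a fresh group at the very front
      rw [if_pos hlt]
      have hxfresh : pvDateKey x ∉ (e :: es) := by
        intro hm
        rcases List.mem_cons.mp hm with hme | hmes
        · subst hme; exact lt_irrefl _ hlt
        · exact absurd (he _ hmes) (not_lt.mpr hlt.le)
      have hxG : pvG xs (pvDateKey x) = [] :=
        pvG_nil_of_not_mem xs _ (fun hm => hxfresh (h2 hm))
      rw [hG, List.cons_append, pv_insertBy_cons,
        if_pos (by simpa [hkt] using hlt)]
      simp only [List.flatMap_cons]
      rw [pvG_append_singleton xs x (pvDateKey x), hxG, if_pos rfl,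
        pvG_append_singleton xs x e,
        if_neg (by rintro rfl; exact hxfresh List.mem_cons_self),
        pv_flatMap_congr es (pvG (xs ++ [x])) (pvG xs) (fun e' he' => by
          rw [pvG_append_singleton, if_neg (by rintro rfl; exact hxfresh (List.mem_cons_of_mem _ he')),
            List.append_nil]), hG]
      simp
    · -- same date as the current maximal group: stability appends x at the end of that group
      rw [if_neg (heq ▸ lt_irrefl e), if_pos heq.symm]
      have hpass : ∀ y ∈ pvG xs e,
          (fun a b => decide (pvDateKey b < pvDateKey a)) x y = false := by
        intro y hy
        simp [pvDateKey_of_mem_pvG xs e y hy, ← heq]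
      rw [pv_insertBy_append _ _ _ _ hpass,
        pv_insertBy_all _ _ _ (fun y hy => by
          have := he _ (pv_key_mem_of_mem_flatMap xs es y hy)
          simp [← heq, this])]
      simp only [List.flatMap_cons]
      rw [pvG_append_singleton xs x e, if_pos heq.symm,
        pv_flatMap_congr es (pvG (xs ++ [x])) (pvG xs) (fun e' he' => by
          rw [pvG_append_singleton, if_neg (by rintro rfl; exact absurd (he _ he') (heq ▸ lt_irrefl _)),
            List.append_nil])]
      simp
    · -- smaller date: skip the whole maximal group and recurse
      rw [if_neg (not_lt.mpr hgt.le), if_neg (fun hh => absurd (hh ▸ hgt) (lt_irrefl _))]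
      have hpass : ∀ y ∈ pvG xs e,
          (fun a b => decide (pvDateKey b < pvDateKey a)) x y = false := by
        intro y hy
        simp [pvDateKey_of_mem_pvG xs e y hy, not_lt.mpr hgt.le]
      rw [pv_insertBy_append _ _ _ _ hpass,
        ih hes (fun e' he' => h1 e' (List.mem_cons_of_mem _ he')) (fun hm => by
          rcases List.mem_cons.mp (h2 hm) with hme | hmes
          · exact absurd (hme ▸ hgt) (lt_irrefl _)
          · exact hmes)]
      simp only [List.flatMap_cons]
      rw [pvG_append_singleton xs x e, if_neg (by rintro rfl; exact lt_irrefl _ hgt),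
        List.append_nil]

theorem mem_pvD (xs : List (List (String × String))) (e : String) :
    e ∈ pvD xs ↔ e ∈ xs.map pvDateKey := by
  rw [pvD, PySem.List.mem_sorted, PySem.List.mem_dedup]

theorem pvD_pairwise_gt (xs : List (List (String × String))) :
    (pvD xs).Pairwise (fun a b => b < a) := by
  have hle : (pvD xs).Pairwise (fun a b => b ≤ a) :=
    PySem.List.sorted_pairwise_rev (PySem.List.dedup (xs.map pvDateKey)) (fun d => d)
  have hnd : (pvD xs).Nodup :=
    ((PySem.List.sorted_perm (PySem.List.dedup (xs.map pvDateKey)) (fun d => d) true).nodup_iff).mpr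
      (PySem.List.nodup_dedup _)
  exact (hnd.and hle).imp (fun h => lt_of_le_of_ne h.2 (fun hba => h.1 hba.symm))

theorem pv_dedup_append_singleton (l : List String) (a : String) :
    PySem.List.dedup (l ++ [a]) =
      if a ∈ PySem.List.dedup l then PySem.List.dedup l else PySem.List.dedup l ++ [a] := by
  have : PySem.List.dedup (l ++ [a]) = PySem.Set.add (PySem.List.dedup l) a := by
    simp [PySem.List.dedup, PySem.Set.ofList, List.foldl_append]
  rw [this, PySem.Set.add]
  split_ifs with h1 h2 <;> first
    | rfl
    | (exfalso; simp_all)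

theorem pvD_append (xs : List (List (String × String))) (x : List (String × String)) :
    pvD (xs ++ [x]) = pvInsDesc (pvDateKey x) (pvD xs) := by
  apply PySem.List.sorted_rev_eq_of_perm_of_pairwise_gt
  · rw [List.map_append, List.map_cons, List.map_nil, pv_dedup_append_singleton]
    split_ifs with h
    · rw [pvInsDesc_of_mem _ _ (pvD_pairwise_gt xs)
        ((mem_pvD xs _).mpr ((PySem.List.mem_dedup _ _).mp h))]
      exact PySem.List.sorted_perm _ _ _
    · have hnm : pvDateKey x ∉ pvD xs := fun hm =>
        h ((PySem.List.mem_dedup _ _).mpr ((mem_pvD xs _).mp hm))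
      exact ((perm_pvInsDesc_of_not_mem _ _ hnm).trans
        (((PySem.List.sorted_perm _ _ _).cons _).trans
          (List.perm_append_singleton _ _).symm))
  · exact pairwise_pvInsDesc _ _ (pvD_pairwise_gt xs)

theorem pv_sorted_flatMap (xs : List (List (String × String))) :
    PySem.List.sorted xs pvDateKey true = (pvD xs).flatMap (pvG xs) := by
  induction xs using List.reverseRecOn with
  | nil => rfl
  | append_singleton xs x ih =>
    rw [PySem.List.sorted_rev_eq_foldl_insertBy, List.foldl_append, List.foldl_cons,
      List.foldl_nil, ← PySem.List.sorted_rev_eq_foldl_insertBy, ih,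
      pv_insertBy_flatMap xs x (pvD xs) (pvD_pairwise_gt xs)
        (fun e he => (mem_pvD xs e).mp he) (fun hm => (mem_pvD xs _).mpr hm),
      pvD_append]

def pvTaskChars (t : List (String × String)) : List Char := pvChars (pvTaskLinesB t)

def pvSecChars (tasks : List (List (String × String))) (e : String) : List Char :=
  ("## " ++ e ++ "\n").toList ++ ((pvG tasks e).map pvTaskChars).flatten ++ "\n".toList

def pvNoteChars (n : List (String × String)) : List Char :=
  ("## Notes -- " ++ pvGetDS n "date" "unknown" ++ "\n").toList
    ++ (pvGetDS n "content" "" ++ "\n\n").toList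

theorem pvChars_append (a b : List String) : pvChars (a ++ b) = pvChars a ++ pvChars b := by
  simp [pvChars]

theorem pvRenderTaskA_toList (md : String) (t : List (String × String)) :
    (pvRenderTaskA md t).toList = md.toList ++ pvTaskChars t := by
  simp only [pvRenderTaskA, pvTaskChars, pvTaskLinesB, pvChars]
  split_ifs <;> simp [String.toList_append]

theorem pvA_inner (l : List (List (String × String))) :
    ∀ md0 : String, (l.foldl pvRenderTaskA md0).toList = md0.toList ++ (l.map pvTaskChars).flatten := by
  induction l with
  | nil => simp
  | cons t ts ih =>
    intro md0
    rw [List.foldl_cons, ih, pvRenderTaskA_toList]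
    simp

theorem pvA_outer (groups : PySem.Dict String (List (List (String × String))))
    (tasks : List (List (String × String)))
    (hget : ∀ e, groups.getD e [] = pvG tasks e) (ds : List String) :
    ∀ md0 : String,
      (ds.foldl (fun md date =>
          ((groups.getD date []).foldl pvRenderTaskA (md ++ "## " ++ date ++ "\n")) ++ "\n") md0).toList
        = md0.toList ++ ds.flatMap (pvSecChars tasks) := by
  induction ds with
  | nil => simp
  | cons e es ih =>
    intro md0
    rw [List.foldl_cons, ih, hget]
    simp [pvA_inner, pvSecChars, String.toList_append]

theorem pvA_notes (ns : List (List (String × String))) :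
    ∀ md0 : String,
      (ns.foldl (fun md n =>
          md ++ "## Notes -- " ++ pvGetDS n "date" "unknown" ++ "\n"
             ++ (pvGetDS n "content" "" ++ "\n\n")) md0).toList
        = md0.toList ++ ns.flatMap pvNoteChars := by
  induction ns with
  | nil => simp
  | cons n ns ih =>
    intro md0
    rw [List.foldl_cons, ih]
    simp [pvNoteChars, String.toList_append]

theorem pv_groups_getD (tasks : List (List (String × String))) (e : String) :
    (tasks.foldl (fun g t => PySem.Dict.modify g (pvDateKey t) [] (fun l => l ++ [t]))
        PySem.Dict.empty).getD e [] = pvG tasks e := by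
  have hmap : tasks.foldl (fun g t => PySem.Dict.modify g (pvDateKey t) [] (fun l => l ++ [t]))
        PySem.Dict.empty
      = (tasks.map (fun t => (pvDateKey t, t))).foldl
          (fun g p => PySem.Dict.modify g p.1 [] (fun l => l ++ [p.2])) PySem.Dict.empty := by
    rw [List.foldl_map]
  rw [hmap, PySem.Dict.getD_foldl_modify_append]
  simp [pvG, List.filter_map, Function.comp_def]

theorem pv_groups_keys (tasks : List (List (String × String))) :
    (tasks.foldl (fun g t => PySem.Dict.modify g (pvDateKey t) [] (fun l => l ++ [t]))
        PySem.Dict.empty).keys = PySem.List.dedup (tasks.map pvDateKey) := by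
  rw [PySem.Dict.keys_foldl_modify_key tasks pvDateKey [] (fun _ t => (fun l => l ++ [t]))
    PySem.Dict.empty]
  rfl

theorem pvA_chars (data : List (String × List (List (String × String)))) :
    (archive_to_markdown data).toList =
      (pvD (PySem.Dict.getD (⟨data⟩ : PySem.Dict String (List (List (String × String)))) "tasks" [])).flatMap
          (pvSecChars (PySem.Dict.getD (⟨data⟩ : PySem.Dict String (List (List (String × String)))) "tasks" []))
        ++ (PySem.Dict.getD (⟨data⟩ : PySem.Dict String (List (List (String × String)))) "notes" []).flatMap pvNoteChars := by
  simp only [archive_to_markdown]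
  rw [pvA_notes, pvA_outer _ _ (pv_groups_getD _), pv_groups_keys, ← pvD]
  simp

def pvTail (prev : Option String) : List String := if prev.isSome then ["\n"] else []

theorem pvChars_nil : pvChars [] = [] := rfl

theorem pvChars_cons (s : String) (l : List String) : pvChars (s :: l) = s.toList ++ pvChars l := by
  simp [pvChars]

theorem pvChars_flatMap (l : List (List (String × String))) :
    pvChars (l.flatMap pvTaskLinesB) = (l.map pvTaskChars).flatten := by
  induction l with
  | nil => rfl
  | cons t ts ih => simp [List.flatMap_cons, pvChars_append, ih, pvTaskChars]

theorem pvB_run_group (e : String) (ts : List (List (String × String)))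
    (h : ∀ t ∈ ts, pvDateKey t = e) :
    ∀ out : List String,
      ts.foldl pvStepB (out, some e) = (out ++ ts.flatMap pvTaskLinesB, some e) := by
  induction ts with
  | nil => simp
  | cons t ts ih =>
    intro out
    have hkt : pvDateKey t = e := h t List.mem_cons_self
    rw [List.foldl_cons, show pvStepB (out, some e) t = (out ++ pvTaskLinesB t, some e) from by
        simp [pvStepB, hkt],
      ih (fun u hu => h u (List.mem_cons_of_mem _ hu))]
    simp

theorem pvB_run (tasks : List (List (String × String))) :
    ∀ ds : List String, ds.Pairwise (fun a b => b < a) →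
      (∀ e ∈ ds, e ∈ tasks.map pvDateKey) →
      ∀ (out : List String) (prev : Option String), (∀ e ∈ ds, prev ≠ some e) →
        pvChars (((ds.flatMap (pvG tasks)).foldl pvStepB (out, prev)).1
            ++ pvTail ((ds.flatMap (pvG tasks)).foldl pvStepB (out, prev)).2)
          = pvChars (out ++ pvTail prev) ++ ds.flatMap (pvSecChars tasks) := by
  intro ds
  induction ds with
  | nil => simp
  | cons e es ih =>
    intro hpw hmem out prev hprev
    rcases List.pairwise_cons.mp hpw with ⟨he, hes⟩
    rcases (List.exists_cons_of_ne_nil (pvG_ne_nil tasks e (hmem e List.mem_cons_self)))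
      with ⟨t, ts, hG⟩
    have hkt : pvDateKey t = e := pvDateKey_of_mem_pvG tasks e t (hG ▸ List.mem_cons_self)
    have hstep : pvStepB (out, prev) t =
        (out ++ pvTail prev ++ ["## " ++ e ++ "\n"] ++ pvTaskLinesB t, some e) := by
      simp only [pvStepB, hkt, pvTail]
      rw [if_pos (by simpa using (hprev e List.mem_cons_self))]
    rw [List.flatMap_cons, List.foldl_append, hG, List.foldl_cons, hstep,
      pvB_run_group e ts (fun u hu => pvDateKey_of_mem_pvG tasks e u (hG ▸ List.mem_cons_of_mem _ hu)),
      ih hes (fun e' he' => hmem e' (List.mem_cons_of_mem _ he'))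
        _ (some e) (fun e' he' => by simpa using (ne_of_gt (he e' he')))]
    have hGsplit : (pvG tasks e).flatMap pvTaskLinesB = pvTaskLinesB t ++ ts.flatMap pvTaskLinesB := by
      rw [hG, List.flatMap_cons]
    simp only [pvTail, Option.isSome_some, if_true, List.flatMap_cons]
    simp [pvSecChars, pvChars_append, pvChars_cons, pvChars_flatMap, hG,
      pvChars_nil, pvTaskChars, String.toList_append, List.append_assoc]

theorem pv_join_toList (out : List String) :
    (PySem.Str.join "" out).toList = pvChars out := by
  have hnil : ∀ ls : List (List Char), PySem.Chars.join [] ls = ls.flatten := by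
    intro ls
    induction ls with
    | nil => rfl
    | cons a t ih =>
      cases t with
      | nil => simp [PySem.Chars.join, List.intercalate]
      | cons b t2 =>
        simp only [PySem.Chars.join, List.intercalate] at *
        simp [List.intersperse] at *
        simpa using ih
  simp [PySem.Str.join, hnil, pvChars]

theorem pvB_notes (ns : List (List (String × String))) :
    ∀ out0 : List String,
      pvChars (ns.foldl (fun out n =>
          out ++ ["## Notes -- " ++ pvGetDS n "date" "unknown" ++ "\n",
                  pvGetDS n "content" "" ++ "\n\n"]) out0)
        = pvChars out0 ++ ns.flatMap pvNoteChars := by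
  induction ns with
  | nil => simp
  | cons n ns ih =>
    intro out0
    rw [List.foldl_cons, ih]
    simp [pvChars, pvNoteChars, String.toList_append]

theorem pvB_chars (data : List (String × List (List (String × String)))) :
    (archive_to_markdown_alt data).toList =
      (pvD (PySem.Dict.getD (⟨data⟩ : PySem.Dict String (List (List (String × String)))) "tasks" [])).flatMap
          (pvSecChars (PySem.Dict.getD (⟨data⟩ : PySem.Dict String (List (List (String × String)))) "tasks" []))
        ++ (PySem.Dict.getD (⟨data⟩ : PySem.Dict String (List (List (String × String)))) "notes" []).flatMap pvNoteChars := by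
  simp only [archive_to_markdown_alt]
  rw [pv_join_toList, pvB_notes, pv_sorted_flatMap]
  have := pvB_run (PySem.Dict.getD (⟨data⟩ : PySem.Dict String (List (List (String × String)))) "tasks" [])
    (pvD (PySem.Dict.getD (⟨data⟩ : PySem.Dict String (List (List (String × String)))) "tasks" []))
    (pvD_pairwise_gt _) (fun e he => (mem_pvD _ e).mp he) [] none (by simp)
  simp only [pvTail] at this
  rw [this]
  simp [pvChars]

-- ===== VERDICT (by name: the statement is the Claim_ definition above) =====
theorem archive_to_markdown_spec : Claim_equal_archive_to_markdown := by
  intro data _ _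
  show archive_to_markdown data = archive_to_markdown_alt data
  exact String.toList_inj.mp (by rw [pvA_chars, pvB_chars])
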